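-- pv_equiv track=rewrite | github.com/bensenberner/ctci | textToNumberEquation.py | checkMapping
-- ===== SOURCE A (Python) =====
-- def checkMapping(first, second, result, mapping):
--     addition = 0
--     for num in [first, second]:
--         multiplier = 1
--         for i in range(len(num)-1, -1, -1):
--             addition += mapping[num[i]] * (multiplier)
--             multiplier *= 10
--
--     sum = 0
--     multiplier = 1
--     for i in range(len(result)-1, -1, -1):
--         sum += mapping[result[i]] * (multiplier)
--         multiplier *= 10
--
--     return addition == sum
-- ===== SOURCE B (Python) =====
-- def checkMapping(first, second, result, mapping):
--     def toNum(s):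
--         val = 0
--         for c in s:
--             val = val * 10 + mapping[c]
--         return val
--     return toNum(first) + toNum(second) == toNum(result)
-- ===== Notes on version B (the rewrite author's own statement) =====
-- stated objective: simpler
-- what changed: Replaces the reverse-index loops with co-accumulated addition/multiplier state by a single forward Horner helper toNum (val = val*10 + mapping[c]) applied independently to the three strings and combined at the end.
import Mathlib
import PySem

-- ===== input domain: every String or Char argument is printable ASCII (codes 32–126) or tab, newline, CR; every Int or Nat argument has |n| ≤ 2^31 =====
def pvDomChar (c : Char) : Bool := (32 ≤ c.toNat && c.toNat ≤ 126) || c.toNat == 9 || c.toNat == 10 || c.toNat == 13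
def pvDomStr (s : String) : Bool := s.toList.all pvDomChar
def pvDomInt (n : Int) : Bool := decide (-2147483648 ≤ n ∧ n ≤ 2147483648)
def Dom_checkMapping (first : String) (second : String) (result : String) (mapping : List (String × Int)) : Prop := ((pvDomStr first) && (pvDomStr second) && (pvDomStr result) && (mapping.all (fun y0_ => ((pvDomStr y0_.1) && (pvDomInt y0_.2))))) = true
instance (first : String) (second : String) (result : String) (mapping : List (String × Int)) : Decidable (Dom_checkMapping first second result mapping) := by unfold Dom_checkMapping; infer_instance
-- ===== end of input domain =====

-- B replaces A's reverse-index loops with co-accumulated addition/multiplier state by a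
-- forward Horner helper toNum applied independently to the three strings (objective: simpler).


-- ===== PORT A =====
-- dict lookup mapping[c] (first match; Pre_ guarantees the key is present, so the
-- default 0 is never reached on admitted inputs — where Python raises KeyError)
def mget (mapping : List (String × Int)) (c : String) : Int :=
  match mapping.find? (fun p => p.1 == c) with
  | some p => p.2
  | none => 0

-- one iteration of A's reverse loop: state (addition/sum, multiplier)
def stepRev (mapping : List (String × Int)) (st : Int × Int) (c : Char) : Int × Int :=
  (st.1 + mget mapping (String.ofList [c]) * st.2, st.2 * 10)

def checkMapping (first : String) (second : String) (result : String) (mapping : List (String × Int)) : Bool :=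
  -- for num in [first, second]: multiplier = 1; for i in range(len(num)-1, -1, -1): …
  let addition := [first, second].foldl
    (fun acc num => (num.toList.reverse.foldl (stepRev mapping) (acc, 1)).1) 0
  let sum := (result.toList.reverse.foldl (stepRev mapping) (0, 1)).1
  decide (addition = sum)

-- ===== PORT B =====
def toNum (mapping : List (String × Int)) (s : String) : Int :=
  s.toList.foldl (fun val c => val * 10 + mget mapping (String.ofList [c])) 0

def checkMapping_alt (first : String) (second : String) (result : String) (mapping : List (String × Int)) : Bool :=
  decide (toNum mapping first + toNum mapping second = toNum mapping result)

-- ===== PRECONDITION & SPEC =====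
-- Pre_ excludes exactly the inputs on which Python A raises KeyError: some character of
-- first/second/result has no entry in mapping.
def Pre_checkMapping (first : String) (second : String) (result : String) (mapping : List (String × Int)) : Prop :=
  ((first.toList ++ second.toList ++ result.toList).all
    (fun c => mapping.any (fun p => p.1 == String.ofList [c]))) = true

instance (first : String) (second : String) (result : String) (mapping : List (String × Int)) : Decidable (Pre_checkMapping first second result mapping) := by unfold Pre_checkMapping; infer_instance

def pvWitness_checkMapping : String × String × String × (List (String × Int)) :=
  ("ab", "c", "bd", [("a", 1), ("b", 2), ("c", 3), ("d", 4)])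

def Spec_checkMapping (first : String) (second : String) (result : String) (mapping : List (String × Int)) (out : Bool) : Prop := out = checkMapping_alt first second result mapping
instance (first : String) (second : String) (result : String) (mapping : List (String × Int)) (out : Bool) : Decidable (Spec_checkMapping first second result mapping out) := by unfold Spec_checkMapping; infer_instance

-- ===== CLAIM (what is proved, stated in full; the proofs are below) =====
def Claim_equal_checkMapping : Prop := ∀ (first : String) (second : String) (result : String) (mapping : List (String × Int)), Dom_checkMapping first second result mapping → Pre_checkMapping first second result mapping → Spec_checkMapping first second result mapping (checkMapping first second result mapping)

-- ===== LEMMAS AND PROOFS =====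

-- Horner folding from an arbitrary initial value
theorem horner_shift (m : List (String × Int)) (cs : List Char) :
    ∀ v : Int, cs.foldl (fun val c => val * 10 + mget m (String.ofList [c])) v
      = v * 10 ^ cs.length + cs.foldl (fun val c => val * 10 + mget m (String.ofList [c])) 0 := by
  induction cs with
  | nil => intro v; simp
  | cons c cs ih =>
      intro v
      simp only [List.foldl_cons, List.length_cons]
      rw [ih (v * 10 + mget m (String.ofList [c])), ih (0 * 10 + mget m (String.ofList [c]))]
      ring

-- A's reverse loop computes (acc + mult * Horner value, mult * 10^len)
theorem foldRev_eq (m : List (String × Int)) (cs : List Char) :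
    ∀ acc mult : Int, cs.reverse.foldl (stepRev m) (acc, mult)
      = (acc + mult * cs.foldl (fun val c => val * 10 + mget m (String.ofList [c])) 0,
         mult * 10 ^ cs.length) := by
  induction cs with
  | nil => intro acc mult; simp
  | cons c cs ih =>
      intro acc mult
      simp only [List.reverse_cons, List.foldl_append, List.foldl_cons, List.foldl_nil,
        List.length_cons, ih acc mult, stepRev]
      rw [horner_shift m cs (0 * 10 + mget m (String.ofList [c]))]
      rw [Prod.mk.injEq]
      constructor <;> ring

-- ===== VERDICT (by name: the statement is the Claim_ definition above) =====
theorem checkMapping_spec : Claim_equal_checkMapping := by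
  intro first second result mapping _ _
  unfold Spec_checkMapping checkMapping checkMapping_alt toNum
  simp only [List.foldl_cons, List.foldl_nil, foldRev_eq]
  rw [decide_eq_decide]
  constructor <;> intro h <;> linarith
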